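-- pv_equiv track=rewrite | github.com/arzaanxeng/Python_Codes | fundamentals/Robot_unique_location.py | unique_locations
-- ===== SOURCE A (Python) =====
-- def unique_locations(path):
--     unique_path = []
--     for i in path:
--         if i not in unique_path:
--             unique_path.append(i)
--             if len(unique_path) == 5:
--                 break
--     return unique_path
-- ===== SOURCE B (Python) =====
-- def unique_locations(path):
--     return list(dict.fromkeys(path))[:5]
-- ===== Notes on version B (the rewrite author's own statement) =====
-- stated objective: idiomatic
-- what changed: Replaced the explicit loop with a quadratic membership test and a break by an order-preserving dict.fromkeys de-duplication followed by a [:5] slice.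
import Mathlib
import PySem

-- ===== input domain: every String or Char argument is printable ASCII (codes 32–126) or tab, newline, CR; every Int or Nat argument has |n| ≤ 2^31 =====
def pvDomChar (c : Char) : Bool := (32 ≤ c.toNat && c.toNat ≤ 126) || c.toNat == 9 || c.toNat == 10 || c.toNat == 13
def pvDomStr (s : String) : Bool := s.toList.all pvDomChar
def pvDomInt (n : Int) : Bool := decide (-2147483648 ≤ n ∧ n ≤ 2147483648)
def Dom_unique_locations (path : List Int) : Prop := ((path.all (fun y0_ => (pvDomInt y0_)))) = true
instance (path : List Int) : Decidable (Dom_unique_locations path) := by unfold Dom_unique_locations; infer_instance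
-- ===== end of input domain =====

-- B replaces A's loop (membership list + break at 5) by dict.fromkeys de-duplication and a [:5] slice (idiomatic).

-- ===== PORT A =====
-- the for-loop with its 'unique_path' accumulator and the break at length 5
def uniqueLocLoop : List Int → List Int → List Int
  | [], acc => acc
  | i :: rest, acc =>
    if i ∈ acc then uniqueLocLoop rest acc
    else if (acc ++ [i]).length = 5 then acc ++ [i]
    else uniqueLocLoop rest (acc ++ [i])

def unique_locations (path : List Int) : List Int := uniqueLocLoop path []

-- ===== PORT B =====
-- list(dict.fromkeys(path)) is PySem.List.dedup; [:5] on the nonnegative bound 5 is List.take 5 (exact)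
def unique_locations_alt (path : List Int) : List Int := (PySem.List.dedup path).take 5

-- ===== PRECONDITION & SPEC =====
def Spec_unique_locations (path : List Int) (out : List Int) : Prop := out = unique_locations_alt path
instance (path : List Int) (out : List Int) : Decidable (Spec_unique_locations path out) := by unfold Spec_unique_locations; infer_instance

-- ===== CLAIM (what is proved, stated in full; the proofs are below) =====
def Claim_equal_unique_locations : Prop := ∀ (path : List Int), Dom_unique_locations path → Spec_unique_locations path (unique_locations path)

-- ===== LEMMAS AND PROOFS =====
-- loop invariant: while the accumulator is short of 5, the loop computes the first 5
-- of the order-preserving union of acc with xs's new elements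
theorem uniqueLocLoop_eq_take (xs : List Int) : ∀ (acc : List Int), acc.length < 5 →
    uniqueLocLoop xs acc = (PySem.Set.update acc xs).take 5 := by
  induction xs with
  | nil =>
    intro acc h
    simp [uniqueLocLoop, PySem.Set.update, List.take_of_length_le (Nat.le_of_lt h)]
  | cons i xs ih =>
    intro acc h
    rw [PySem.Set.update_cons]
    by_cases hm : i ∈ acc
    · rw [PySem.Set.add_of_mem hm]
      simpa [uniqueLocLoop, hm] using ih acc h
    · rw [PySem.Set.add_of_not_mem hm]
      by_cases h5 : (acc ++ [i]).length = 5
      · have h4 : acc.length = 4 := by simp at h5; omega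
        rw [PySem.Set.update_eq_append_filter]
        simp only [uniqueLocLoop, hm, if_neg, not_false_eq_true]
        rw [← h5, List.take_left]
        simp
      · have h4 : acc.length ≠ 4 := by simp at h5 ⊢; omega
        have hlt : (acc ++ [i]).length < 5 := by simp; omega
        simpa [uniqueLocLoop, hm, h4] using ih (acc ++ [i]) hlt

-- ===== VERDICT (by name: the statement is the Claim_ definition above) =====
theorem unique_locations_spec : Claim_equal_unique_locations := by
  intro path _
  unfold Spec_unique_locations unique_locations unique_locations_alt
  rw [uniqueLocLoop_eq_take path [] (by norm_num)]
  simp [PySem.List.dedup_eq_ofList, ← PySem.Set.update_empty]
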